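-- pv_equiv track=rewrite | github.com/iannellog/analizza_log_21-22 | statistics.py | add_tot_occurrences
-- ===== SOURCE A (Python) =====
-- def add_tot_occurrences(log_list):
--     """
--      calculates the total occurrences per user from the list of logs
--     :param log_list: a list of logs
--     :return: a dictionary of dictionary with user codes
--              and total occurrences per user
--     """
--     tab_tot_occurrences = {}
--     for log in log_list:
--         if not log[1] in tab_tot_occurrences:
--             tab_tot_occurrences[(log[1])] = {}
--             tab_tot_occurrences[(log[1])]['tot_occurrences'] = 1
--         else:
--             tab_tot_occurrences[log[1]]['tot_occurrences'] += 1
--     return dict(sorted(tab_tot_occurrences.items()))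
-- ===== SOURCE B (Python) =====
-- def _runs(users):
--     """run-length encode an already-sorted list: [(value, run length)]"""
--     if not users:
--         return []
--     u = users[0]
--     rest = users[1:]
--     k = 0
--     while k < len(rest) and rest[k] == u:
--         k += 1
--     return [(u, 1 + k)] + _runs(rest[k:])
--
--
-- def add_tot_occurrences(log_list):
--     """
--      calculates the total occurrences per user from the list of logs
--     :param log_list: a list of logs
--     :return: a dictionary of dictionary with user codes
--              and total occurrences per user
--     """
--     users = sorted(log[1] for log in log_list)
--     return {u: {'tot_occurrences': c} for u, c in _runs(users)}
-- ===== Notes on version B (the rewrite author's own statement) =====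
-- stated objective: alternative
-- what changed: A counts occurrences in a dict during one pass and sorts the dict items at the end; B extracts the user keys, sorts them first, then run-length groups the sorted list so the result is built already in key order.
import Mathlib
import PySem

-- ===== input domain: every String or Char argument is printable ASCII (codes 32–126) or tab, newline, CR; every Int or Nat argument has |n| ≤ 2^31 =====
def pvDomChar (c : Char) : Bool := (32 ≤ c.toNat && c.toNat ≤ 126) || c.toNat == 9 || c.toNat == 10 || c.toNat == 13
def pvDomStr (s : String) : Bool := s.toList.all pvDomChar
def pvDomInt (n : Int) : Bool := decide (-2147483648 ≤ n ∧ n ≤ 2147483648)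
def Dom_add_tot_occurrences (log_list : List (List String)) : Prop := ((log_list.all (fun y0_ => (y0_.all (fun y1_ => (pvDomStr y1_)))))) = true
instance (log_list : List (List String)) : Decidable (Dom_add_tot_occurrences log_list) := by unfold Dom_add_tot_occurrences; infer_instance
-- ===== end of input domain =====

-- B replaces A's hash-count-then-sort by sort-the-keys-then-run-length-group (alternative algorithm, same results).

-- ===== PORT A =====
def add_tot_occurrences (log_list : List (List String)) : List (String × List (String × Int)) :=
  let tab : PySem.Dict String (PySem.Dict String Int) :=
    log_list.foldl (fun tab log =>
      if tab.contains (PySem.List.pyGetD log 1 "") = false then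
        -- tab[log[1]] = {} ; tab[log[1]]['tot_occurrences'] = 1
        (tab.insert (PySem.List.pyGetD log 1 "") PySem.Dict.empty).modify
          (PySem.List.pyGetD log 1 "") PySem.Dict.empty
          (fun inner => inner.insert "tot_occurrences" 1)
      else
        -- tab[log[1]]['tot_occurrences'] += 1
        tab.modify (PySem.List.pyGetD log 1 "") PySem.Dict.empty
          (fun inner => inner.modify "tot_occurrences" 0 (· + 1))) PySem.Dict.empty
  -- dict(sorted(tab.items())): keys are unique, so Python's tuple comparison only ever reaches
  -- the (string) key component; sorting by the key is exact here
  (PySem.List.sorted tab.items (fun p => p.1) false).map (fun p => (p.1, p.2.items))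

-- ===== PORT B =====
-- k = 0; while k < len(rest) and rest[k] == u: k += 1   (counts the leading run of u)
def pvCountPrefix (u : String) : List String → Nat
  | [] => 0
  | x :: xs => if x == u then pvCountPrefix u xs + 1 else 0

-- _runs(users): run-length encode an already-sorted list
def pvRuns : List String → List (String × Int)
  | [] => []
  | u :: rest =>
    let k := pvCountPrefix u rest
    (u, 1 + (k : Int)) :: pvRuns (rest.drop k)
termination_by l => l.length
decreasing_by simp

def add_tot_occurrences_alt (log_list : List (List String)) : List (String × List (String × Int)) :=
  let users := PySem.List.sorted (log_list.map (fun log => PySem.List.pyGetD log 1 "")) (fun x => x) false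
  (pvRuns users).map (fun p => (p.1, [("tot_occurrences", p.2)]))

-- ===== PRECONDITION & SPEC =====
-- A evaluates log[1] on every log: a log with fewer than 2 entries raises IndexError (B raises there too).
def Pre_add_tot_occurrences (log_list : List (List String)) : Prop :=
  ∀ log ∈ log_list, 2 ≤ log.length
instance (log_list : List (List String)) : Decidable (Pre_add_tot_occurrences log_list) := by
  unfold Pre_add_tot_occurrences; infer_instance
def pvWitness_add_tot_occurrences : List (List String) :=
  [["e1", "u2"], ["e2", "u1"], ["e3", "u2"]]
def Spec_add_tot_occurrences (log_list : List (List String)) (out : List (String × List (String × Int))) : Prop := out = add_tot_occurrences_alt log_list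
instance (log_list : List (List String)) (out : List (String × List (String × Int))) : Decidable (Spec_add_tot_occurrences log_list out) := by unfold Spec_add_tot_occurrences; infer_instance

-- ===== CLAIM (what is proved, stated in full; the proofs are below) =====
def Claim_equal_add_tot_occurrences : Prop := ∀ (log_list : List (List String)), Dom_add_tot_occurrences log_list → Pre_add_tot_occurrences log_list → Spec_add_tot_occurrences log_list (add_tot_occurrences log_list)

-- ===== LEMMAS AND PROOFS =====

-- the key A and B extract from each log entry
def pvKey (log : List String) : String := PySem.List.pyGetD log 1 ""

-- the body of A's counting loop, named for the proofs
def pvStep (d : PySem.Dict String (PySem.Dict String Int)) (k : String) :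
    PySem.Dict String (PySem.Dict String Int) :=
  if d.contains k = false then
    (d.insert k PySem.Dict.empty).modify k PySem.Dict.empty
      (fun inner => inner.insert "tot_occurrences" 1)
  else
    d.modify k PySem.Dict.empty (fun inner => inner.modify "tot_occurrences" 0 (· + 1))

-- the common normal form both outputs are reduced to
def pvCanon (ks : List String) : List (String × List (String × Int)) :=
  (PySem.List.sorted (PySem.Set.ofList ks) (fun x => x) false).map
    (fun k => (k, [("tot_occurrences", (ks.count k : Int))]))

lemma pv_tab_items (l : List String) :
    (l.foldl pvStep PySem.Dict.empty).items
      = (PySem.Set.ofList l).map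
          (fun k => (k, PySem.Dict.mk [("tot_occurrences", (l.count k : Int))])) := by
  induction l using List.reverseRecOn with
  | nil => rfl
  | append_singleton l x ih =>
    rw [List.foldl_append, List.foldl_cons, List.foldl_nil]
    set d := l.foldl pvStep PySem.Dict.empty with hd
    have hkeys : d.keys = PySem.Set.ofList l := by
      show d.items.map Prod.fst = _
      rw [ih, List.map_map]
      simp [Function.comp_def]
    have hnodup : d.keys.Nodup := by rw [hkeys]; exact PySem.Set.nodup_ofList l
    have hcont : d.contains x = decide (x ∈ l) := by
      rw [PySem.Dict.contains_eq_decide_mem_keys, hkeys]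
      simp [PySem.Set.mem_ofList]
    by_cases hx : x ∈ l
    · -- existing key: the entry is overwritten in place
      have hcont' : d.contains x = true := by rw [hcont]; simpa
      have hxit : (x, PySem.Dict.mk [("tot_occurrences", (l.count x : Int))]) ∈ d.items := by
        rw [ih]
        exact List.mem_map_of_mem ((PySem.Set.mem_ofList l x).mpr hx)
      have hgetD : d.getD x PySem.Dict.empty = PySem.Dict.mk [("tot_occurrences", (l.count x : Int))] :=
        PySem.Dict.getD_of_mem_items _ hxit hnodup _
      have hstep : pvStep d x
          = d.insert x (PySem.Dict.mk [("tot_occurrences", ((l.count x : Int) + 1))]) := by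
        rw [pvStep, hcont']
        simp only [Bool.true_eq_false, if_false]
        rw [PySem.Dict.modify, hgetD]
        rfl
      rw [hstep, PySem.Dict.items_insert, hcont']
      simp only [if_true]
      rw [ih, List.map_map]
      have hofl : PySem.Set.ofList (l ++ [x]) = PySem.Set.ofList l := by
        rw [PySem.Set.ofList, List.foldl_append]
        show PySem.Set.add (PySem.Set.ofList l) x = _
        rw [PySem.Set.add]
        have : (PySem.Set.ofList l).contains x = true := by
          simp [PySem.Set.contains, PySem.Set.mem_ofList, hx]
        rw [this]; simp
      rw [hofl]
      apply List.map_congr_left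
      intro w hw
      by_cases hwx : w = x
      · subst hwx
        simp only [Function.comp_apply, beq_self_eq_true, if_true]
        rw [List.count_append]
        simp
      · have : ((w, PySem.Dict.mk [("tot_occurrences", (l.count w : Int))]).1 == x) = false := by
          simpa using hwx
        simp only [Function.comp_apply, this]
        rw [List.count_append]
        simp only [List.count_singleton]
        have : ¬ x = w := fun h => hwx h.symm
        simp [this]
    · -- fresh key: the entry is appended at the end
      have hcont' : d.contains x = false := by rw [hcont]; simpa
      have hstep : pvStep d x
          = (d.insert x PySem.Dict.empty).insert x (PySem.Dict.mk [("tot_occurrences", (1 : Int))]) := by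
        rw [pvStep, hcont']
        simp only [if_true]
        rw [PySem.Dict.modify]
        congr 1
        rw [PySem.Dict.getD_insert_self]
        rfl
      rw [hstep, PySem.Dict.insert_insert_self, PySem.Dict.items_insert, hcont']
      simp only [Bool.false_eq_true, if_false]
      rw [ih]
      have hofl : PySem.Set.ofList (l ++ [x]) = PySem.Set.ofList l ++ [x] := by
        rw [PySem.Set.ofList, List.foldl_append]
        show PySem.Set.add (PySem.Set.ofList l) x = _
        rw [PySem.Set.add]
        have : (PySem.Set.ofList l).contains x = false := by
          simp [PySem.Set.contains, PySem.Set.mem_ofList, hx]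
        rw [this]; simp
      rw [hofl, List.map_append]
      congr 1
      · apply List.map_congr_left
        intro w hw
        have hwl : w ∈ l := (PySem.Set.mem_ofList l w).mp hw
        have hwx : w ≠ x := fun h => hx (h ▸ hwl)
        rw [List.count_append]
        simp only [List.count_singleton]
        have : ¬ x = w := fun h => hwx h.symm
        simp [this]
      · simp [List.count_append, List.count_eq_zero.mpr hx]

lemma pv_portA_eq_canon (log_list : List (List String)) :
    add_tot_occurrences log_list = pvCanon (log_list.map pvKey) := by
  rw [add_tot_occurrences]
  have hfold : log_list.foldl (fun tab log =>
      if tab.contains (PySem.List.pyGetD log 1 "") = false then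
        (tab.insert (PySem.List.pyGetD log 1 "") PySem.Dict.empty).modify
          (PySem.List.pyGetD log 1 "") PySem.Dict.empty
          (fun inner => inner.insert "tot_occurrences" 1)
      else
        tab.modify (PySem.List.pyGetD log 1 "") PySem.Dict.empty
          (fun inner => inner.modify "tot_occurrences" 0 (· + 1))) PySem.Dict.empty
      = (log_list.map pvKey).foldl pvStep PySem.Dict.empty := by
    rw [List.foldl_map]
    rfl
  simp only [hfold]
  set ks := log_list.map pvKey with hks
  rw [pv_tab_items ks]
  have hsorted : PySem.List.sorted
      ((PySem.Set.ofList ks).map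
        (fun k => (k, PySem.Dict.mk [("tot_occurrences", (ks.count k : Int))])))
      (fun p => p.1)
      = (PySem.List.sorted (PySem.Set.ofList ks) (fun x => x) false).map
        (fun k => (k, PySem.Dict.mk [("tot_occurrences", (ks.count k : Int))])) := by
    apply PySem.List.sorted_eq_of_perm_of_pairwise_lt
    · exact (PySem.List.sorted_perm _ _ _).map _
    · rw [List.pairwise_map]
      exact PySem.List.sorted_ofList_pairwise_lt ks
  rw [hsorted, List.map_map]
  rfl

lemma pv_countPrefix_eq (u : String) (xs : List String) :
    pvCountPrefix u xs = (xs.takeWhile (fun x => x == u)).length := by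
  induction xs with
  | nil => rfl
  | cons x xs ih =>
    by_cases h : x = u <;> simp [pvCountPrefix, h, ih]

lemma pv_foldl_add_cons (u : String) (t : List String) :
    ∀ s : List String, u ∉ t → u ∉ s →
      t.foldl PySem.Set.add (u :: s) = u :: t.foldl PySem.Set.add s := by
  induction t with
  | nil => intro s _ _; rfl
  | cons x t ih =>
    intro s hut hus
    have hxu : x ≠ u := fun h => hut (h ▸ List.mem_cons_self)
    have h1 : PySem.Set.add (u :: s) x = u :: PySem.Set.add s x := by
      simp [PySem.Set.add, PySem.Set.contains, hxu]
      split <;> rfl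
    rw [List.foldl_cons, h1, List.foldl_cons]
    apply ih
    · exact fun h => hut (List.mem_cons_of_mem _ h)
    · intro h
      unfold PySem.Set.add at h
      split at h
      · exact hus h
      · rcases List.mem_append.mp h with h | h
        · exact hus h
        · exact hxu (List.mem_singleton.mp h).symm

lemma pv_ofList_block (u : String) (b t : List String)
    (hb : ∀ x ∈ b, x = u) (ht : u ∉ t) :
    PySem.Set.ofList (u :: (b ++ t)) = u :: PySem.Set.ofList t := by
  have h1 : PySem.Set.ofList (u :: (b ++ t)) = (b ++ t).foldl PySem.Set.add [u] := by
    simp [PySem.Set.ofList, PySem.Set.empty, PySem.Set.add, PySem.Set.contains]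
  have h2 : ∀ b' : List String, (∀ x ∈ b', x = u) → b'.foldl PySem.Set.add [u] = [u] := by
    intro b'
    induction b' with
    | nil => intro _; rfl
    | cons x b' ih =>
      intro hb'
      have hx := hb' x List.mem_cons_self
      subst hx
      rw [List.foldl_cons]
      have hc : PySem.Set.add [x] x = [x] := by simp [PySem.Set.add, PySem.Set.contains]
      rw [hc]
      exact ih (fun y hy => hb' y (List.mem_cons_of_mem _ hy))
  rw [h1, List.foldl_append, h2 b hb]
  exact pv_foldl_add_cons u t [] ht (by simp)

lemma pv_ofList_sublist (xs : List String) : (PySem.Set.ofList xs).Sublist xs := by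
  induction xs using List.reverseRecOn with
  | nil => simp [PySem.Set.ofList]
  | append_singleton xs x ih =>
    have h : PySem.Set.ofList (xs ++ [x]) = PySem.Set.add (PySem.Set.ofList xs) x := by
      simp [PySem.Set.ofList, List.foldl_append]
    rw [h]
    unfold PySem.Set.add
    split
    · exact ih.trans (List.sublist_append_left _ _)
    · exact List.Sublist.append ih (List.Sublist.refl _)

lemma pv_dropWhile_head_false {p : String → Bool} {l t' : List String} {t0 : String}
    (h : l.dropWhile p = t0 :: t') : p t0 = false := by
  induction l with
  | nil => cases h
  | cons x l ih =>
    rw [List.dropWhile_cons] at h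
    split at h
    · exact ih h
    · cases h; simpa using ‹¬ p t0 = true›

lemma pv_runs_sorted (vs : List String) :
    vs.Pairwise (· ≤ ·) →
      pvRuns vs = (PySem.Set.ofList vs).map (fun u => (u, (vs.count u : Int))) := by
  induction vs using pvRuns.induct with
  | case1 => intro _; simp [pvRuns]
  | case2 u rest _k ih =>
    intro h
    have hle : ∀ y ∈ rest, u ≤ y := (List.pairwise_cons.mp h).1
    have hrt : rest.Pairwise (· ≤ ·) := (List.pairwise_cons.mp h).2
    set b := rest.takeWhile (fun x => x == u) with hbdef
    set t := rest.dropWhile (fun x => x == u) with htdef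
    have hrest : rest = b ++ t := List.takeWhile_append_dropWhile.symm
    have hk : pvCountPrefix u rest = b.length := pv_countPrefix_eq u rest
    have hdrop : rest.drop (pvCountPrefix u rest) = t := by
      rw [hk]; conv_lhs => rw [hrest]
      exact List.drop_left
    have hb : ∀ x ∈ b, x = u := fun x hx => by
      simpa using List.mem_takeWhile_imp hx
    have htp : t.Pairwise (· ≤ ·) := hrt.sublist (List.dropWhile_sublist _)
    have hut : ∀ w ∈ t, u < w := by
      intro w hw
      cases ht : t with
      | nil => rw [ht] at hw; cases hw
      | cons t0 t' =>
        have ht0m : t0 ∈ rest := by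
          rw [hrest, ht]; exact List.mem_append_right _ List.mem_cons_self
        have h0' : t0 ≠ u := by
          have := pv_dropWhile_head_false (htdef ▸ ht)
          simpa using this
        have hu0 : u < t0 := lt_of_le_of_ne (hle t0 ht0m) (Ne.symm h0')
        rw [ht] at hw
        rcases List.mem_cons.mp hw with rfl | hw'
        · exact hu0
        · have : t0 ≤ w := (List.pairwise_cons.mp (ht ▸ htp)).1 w hw'
          exact lt_of_lt_of_le hu0 this
    have hu_not_t : u ∉ t := fun hmem => lt_irrefl u (hut u hmem)
    have hofl : PySem.Set.ofList (u :: rest) = u :: PySem.Set.ofList t := by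
      conv_lhs => rw [hrest]
      exact pv_ofList_block u b t hb hu_not_t
    have hbcount : b.count u = b.length := List.count_eq_length.mpr (fun y hy => (hb y hy).symm)
    have htcount : t.count u = 0 := List.count_eq_zero.mpr hu_not_t
    have hcu : (u :: rest).count u = b.length + 1 := by
      rw [List.count_cons_self, hrest, List.count_append, hbcount, htcount]
    have ih' : List.Pairwise (fun x1 x2 => x1 ≤ x2) t →
        pvRuns t = List.map (fun w => (w, (t.count w : Int))) (PySem.Set.ofList t) := by
      have hdrop' : List.drop _k rest = t := hdrop
      rw [hdrop'] at ih; exact ih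
    rw [pvRuns, hofl, List.map_cons, hcu, hdrop, ih' htp]
    congr 1
    · rw [hk]; push_cast; rw [Int.add_comm]
    apply List.map_congr_left
    intro w hw
    have hwt : w ∈ t := (PySem.Set.mem_ofList t w).mp hw
    have hwu : w ≠ u := fun heq => absurd (heq ▸ hut w hwt) (lt_irrefl u)
    have hbw : b.count w = 0 := List.count_eq_zero.mpr (fun hmem => hwu (hb w hmem))
    have : (u :: rest).count w = t.count w := by
      rw [List.count_cons_of_ne (Ne.symm hwu), hrest, List.count_append, hbw, Nat.zero_add]
    rw [this]

lemma pv_portB_eq_canon (log_list : List (List String)) :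
    add_tot_occurrences_alt log_list = pvCanon (log_list.map pvKey) := by
  rw [add_tot_occurrences_alt]
  set ks := log_list.map pvKey with hks
  have hmap : log_list.map (fun log => PySem.List.pyGetD log 1 "") = ks := rfl
  rw [hmap]
  set vs := PySem.List.sorted ks (fun x => x) false with hvs
  have hvp : vs.Pairwise (· ≤ ·) := PySem.List.sorted_pairwise ks (fun x => x)
  have hperm : vs.Perm ks := PySem.List.sorted_perm ks (fun x => x) false
  have hofle : PySem.List.sorted (PySem.Set.ofList ks) (fun x => x) false = PySem.Set.ofList vs := by
    apply PySem.List.sorted_eq_of_perm_of_pairwise_lt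
    · exact (List.perm_ext_iff_of_nodup (PySem.Set.nodup_ofList vs) (PySem.Set.nodup_ofList ks)).mpr
        (fun a => by rw [PySem.Set.mem_ofList, PySem.Set.mem_ofList]; exact hperm.mem_iff)
    · have hle : (PySem.Set.ofList vs).Pairwise (· ≤ ·) :=
        hvp.sublist (pv_ofList_sublist vs)
      have hne : (PySem.Set.ofList vs).Pairwise (· ≠ ·) := PySem.Set.nodup_ofList vs
      exact (hle.and hne).imp (fun ⟨h1, h2⟩ => lt_of_le_of_ne h1 h2)
  rw [pv_runs_sorted vs hvp, List.map_map, pvCanon, hofle]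
  apply List.map_congr_left
  intro w hw
  simp only [Function.comp_apply]
  rw [hperm.count_eq]

-- ===== VERDICT (by name: the statement is the Claim_ definition above) =====
theorem add_tot_occurrences_spec : Claim_equal_add_tot_occurrences := by
  intro log_list _ _
  show add_tot_occurrences log_list = add_tot_occurrences_alt log_list
  rw [pv_portA_eq_canon, pv_portB_eq_canon]
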